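-- pv_equiv track=rewrite | github.com/posl/comment_recommendation | script/mod_gen/5_time/zh/216_C/3.py | solve
-- ===== SOURCE A (Python) =====
-- def solve(n):
--     s = ''
--     while n > 0:
--         if n % 2 == 0:
--             n = n // 2
--             s += 'B'
--         else:
--             n -= 1
--             s += 'A'
--     return s[::-1]
-- ===== SOURCE B (Python) =====
-- def solve(n):
--     if n <= 0:
--         return ''
--     bits = []
--     while n > 0:
--         n, r = divmod(n, 2)
--         bits.append(r)
--     res = 'A'
--     for b in reversed(bits[:-1]):
--         res += 'B' if b == 0 else 'BA'
--     return res
-- ===== Notes on version B (the rewrite author's own statement) =====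
-- stated objective: alternative
-- what changed: B extracts the binary digits once with divmod and builds the result in a single forward pass (A for the leading 1, B/BA per following bit), instead of A's interleaved halving/decrement loop followed by reversing the accumulated string.
import Mathlib
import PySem

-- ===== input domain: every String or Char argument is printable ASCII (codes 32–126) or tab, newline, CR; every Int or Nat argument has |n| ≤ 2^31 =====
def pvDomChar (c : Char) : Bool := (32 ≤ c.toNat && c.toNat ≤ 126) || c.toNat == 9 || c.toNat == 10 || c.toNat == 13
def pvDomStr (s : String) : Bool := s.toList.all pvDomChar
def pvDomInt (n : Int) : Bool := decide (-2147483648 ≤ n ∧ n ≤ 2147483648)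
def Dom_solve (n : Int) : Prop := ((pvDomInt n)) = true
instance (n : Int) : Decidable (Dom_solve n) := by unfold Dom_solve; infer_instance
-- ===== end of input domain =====

-- B builds the A/B code in one forward pass over n's binary digits; A's halving/decrement
-- loop plus final reversal is replaced by a divmod bit-extraction and a single fold.

-- ===== PORT A =====
-- the while-loop of A, carrying the string s as a list of chars
def solveLoop (n : Int) (s : List Char) : List Char :=
  if _h : n > 0 then
    if PySem.Int.mod n 2 = 0 then
      solveLoop (PySem.Int.floordiv n 2) (s ++ ['B'])
    else
      solveLoop (n - 1) (s ++ ['A'])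
  else s
termination_by n.toNat
decreasing_by
  · rw [PySem.Int.floordiv_eq_ediv_of_pos (by omega)]; omega
  · omega

-- s[::-1] is reverse (PySem.List.slice?_none_none_neg_one)
def solve (n : Int) : String := String.ofList (solveLoop n []).reverse

-- ===== PORT B =====
-- B's divmod loop collecting remainders (least-significant first)
def bitsLoop (n : Int) (bits : List Int) : List Int :=
  if _h : n > 0 then
    bitsLoop (PySem.Int.floordiv n 2) (bits ++ [PySem.Int.mod n 2])
  else bits
termination_by n.toNat
decreasing_by
  rw [PySem.Int.floordiv_eq_ediv_of_pos (by omega)]; omega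

-- bits[:-1] is dropLast (PySem.List.slice_to_neg_one); reversed(…) is reverse
def solve_alt (n : Int) : String :=
  if n ≤ 0 then "" else
    String.ofList
      ((bitsLoop n []).dropLast.reverse.foldl
        (fun res b => res ++ (if b = 0 then ['B'] else ['B', 'A'])) ['A'])

-- ===== PRECONDITION & SPEC =====
def Spec_solve (n : Int) (out : String) : Prop := out = solve_alt n
instance (n : Int) (out : String) : Decidable (Spec_solve n out) := by unfold Spec_solve; infer_instance

-- ===== CLAIM (what is proved, stated in full; the proofs are below) =====
def Claim_equal_solve : Prop := ∀ (n : Int), Dom_solve n → Spec_solve n (solve n)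

-- ===== LEMMAS AND PROOFS =====

lemma solveLoop_append (n : Int) (s : List Char) :
    solveLoop n s = s ++ solveLoop n [] := by
  have key : ∀ k : Nat, ∀ n : Int, n.toNat = k → ∀ s : List Char,
      solveLoop n s = s ++ solveLoop n [] := by
    intro k
    induction k using Nat.strong_induction_on with
    | _ k ih =>
      intro n hk s
      conv_lhs => rw [solveLoop]
      conv_rhs => rw [solveLoop]
      by_cases h : n > 0
      · have hlt : (PySem.Int.floordiv n 2).toNat < k := by
          rw [PySem.Int.floordiv_eq_ediv_of_pos (by omega)]; omega
        have hlt' : (n - 1).toNat < k := by omega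
        simp only [dif_pos h]
        by_cases hm : PySem.Int.mod n 2 = 0
        · simp only [if_pos hm]
          rw [ih _ hlt _ rfl (s ++ ['B']), ih _ hlt _ rfl ([] ++ ['B'])]
          simp
        · simp only [if_neg hm]
          rw [ih _ hlt' _ rfl (s ++ ['A']), ih _ hlt' _ rfl ([] ++ ['A'])]
          simp
      · simp [h]
  exact key n.toNat n rfl s

lemma bitsLoop_append (n : Int) (bits : List Int) :
    bitsLoop n bits = bits ++ bitsLoop n [] := by
  have key : ∀ k : Nat, ∀ n : Int, n.toNat = k → ∀ bits : List Int,
      bitsLoop n bits = bits ++ bitsLoop n [] := by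
    intro k
    induction k using Nat.strong_induction_on with
    | _ k ih =>
      intro n hk bits
      conv_lhs => rw [bitsLoop]
      conv_rhs => rw [bitsLoop]
      by_cases h : n > 0
      · have hlt : (PySem.Int.floordiv n 2).toNat < k := by
          rw [PySem.Int.floordiv_eq_ediv_of_pos (by omega)]; omega
        simp only [dif_pos h]
        rw [ih _ hlt _ rfl (bits ++ [PySem.Int.mod n 2]),
            ih _ hlt _ rfl ([] ++ [PySem.Int.mod n 2])]
        simp
      · simp [h]
  exact key n.toNat n rfl bits

lemma bitsLoop_pos (n : Int) (h : 0 < n) :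
    bitsLoop n [] = PySem.Int.mod n 2 :: bitsLoop (PySem.Int.floordiv n 2) [] := by
  rw [bitsLoop]
  simp only [dif_pos h]
  rw [bitsLoop_append]
  simp

lemma main_lemma (n : Int) (h : 0 < n) :
    (solveLoop n []).reverse =
      (bitsLoop n []).dropLast.reverse.foldl
        (fun res b => res ++ (if b = 0 then ['B'] else ['B', 'A'])) ['A'] := by
  have key : ∀ k : Nat, ∀ n : Int, n.toNat = k → 0 < n →
      (solveLoop n []).reverse =
        (bitsLoop n []).dropLast.reverse.foldl
          (fun res b => res ++ (if b = 0 then ['B'] else ['B', 'A'])) ['A'] := by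
    intro k
    induction k using Nat.strong_induction_on with
    | _ k ih =>
      intro n hk h
      have hfd : PySem.Int.floordiv n 2 = n / 2 :=
        PySem.Int.floordiv_eq_ediv_of_pos (by omega)
      have hmd : PySem.Int.mod n 2 = n % 2 :=
        PySem.Int.mod_eq_emod_of_pos (by omega)
      by_cases h1 : n = 1
      · subst h1; simp [solveLoop, bitsLoop, PySem.Int.mod, PySem.Int.floordiv]
      · have hn2 : 0 < n / 2 := by omega
        have hne : bitsLoop (PySem.Int.floordiv n 2) [] ≠ [] := by
          rw [bitsLoop_pos _ (hfd ▸ hn2)]; simp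
        have hlt : (PySem.Int.floordiv n 2).toNat < k := by rw [hfd]; omega
        have ihh := ih _ hlt _ rfl (hfd ▸ hn2)
        rw [bitsLoop_pos n h, List.dropLast_cons_of_ne_nil hne, List.reverse_cons,
            List.foldl_concat, ← ihh]
        by_cases hm : PySem.Int.mod n 2 = 0
        · -- even step of A
          conv_lhs => rw [solveLoop]
          rw [dif_pos h, if_pos hm, solveLoop_append]
          simp only [hm, List.nil_append, List.reverse_append, List.reverse_cons,
            List.reverse_nil, if_pos]
        · -- odd step of A: 'A' then a 'B' step at n-1
          have hm1 : n % 2 = 1 := by omega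
          have hmne : PySem.Int.mod n 2 = 1 := by rw [hmd, hm1]
          have hfd1 : PySem.Int.floordiv (n - 1) 2 = PySem.Int.floordiv n 2 := by
            rw [hfd, PySem.Int.floordiv_eq_ediv_of_pos (a := n - 1) (by omega)]; omega
          have hmd1 : PySem.Int.mod (n - 1) 2 = 0 := by
            rw [PySem.Int.mod_eq_emod_of_pos (a := n - 1) (by omega)]; omega
          conv_lhs => rw [solveLoop]
          rw [dif_pos h, if_neg hm, solveLoop_append]
          conv_lhs => rw [solveLoop]
          rw [dif_pos (by omega : n - 1 > 0), if_pos hmd1, solveLoop_append, hfd1]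
          simp
          omega
  exact key n.toNat n rfl h

-- ===== VERDICT (by name: the statement is the Claim_ definition above) =====
theorem solve_spec : Claim_equal_solve := by
  intro n _
  unfold Spec_solve solve solve_alt
  by_cases h : n ≤ 0
  · simp only [if_pos h]
    rw [solveLoop]
    simp [show ¬ n > 0 by omega]
  · rw [if_neg h, main_lemma n (by omega)]
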